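-- pv_equiv track=rewrite | github.com/HallvardMM/ITGK | Ovinger/Oving 7/Oving-7-Strengmanipulasjon.py | endring
-- ===== SOURCE A (Python) =====
-- def endring(x, y, z):
--     liste_x = list(x)
--     liste_y = list(y)
--     liste_t = list(y)
--     for i in range(len(y)-1):
--         if liste_y[i].lower() == liste_x[0].lower() and liste_y[i+1].lower() == liste_x[1].lower():
--             liste_t[i] = z
--             liste_t[i+1] = ""
--     liste_t = "".join(liste_t)
--     return liste_t
-- ===== SOURCE B (Python) =====
-- def endring(x, y, z):
--     # Two staged passes: first build an index table (set) of match starts,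
--     # then a pointer-jumping emission pass that skips consumed second chars.
--     n = len(y)
--     starts = {i for i in range(n - 1)
--               if y[i].lower() == x[0].lower() and y[i + 1].lower() == x[1].lower()}
--     parts = []
--     i = 0
--     while i < n:
--         if i in starts:
--             parts.append(z)
--             i += 1 if (i + 1) in starts else 2
--         else:
--             parts.append(y[i])
--             i += 1
--     return "".join(parts)
-- ===== Notes on version B (the rewrite author's own statement) =====
-- stated objective: alternative
-- what changed: B replaces A's single pass that overwrites pairs of a copied character list by index with two staged passes: it first builds a set of match-start indices, then emits the output with a pointer-jumping while loop that appends z at a match start and skips the consumed second character (advancing by 2, or by 1 into an overlapping match), so no placeholder empty strings or index writes occur.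
import Mathlib
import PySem

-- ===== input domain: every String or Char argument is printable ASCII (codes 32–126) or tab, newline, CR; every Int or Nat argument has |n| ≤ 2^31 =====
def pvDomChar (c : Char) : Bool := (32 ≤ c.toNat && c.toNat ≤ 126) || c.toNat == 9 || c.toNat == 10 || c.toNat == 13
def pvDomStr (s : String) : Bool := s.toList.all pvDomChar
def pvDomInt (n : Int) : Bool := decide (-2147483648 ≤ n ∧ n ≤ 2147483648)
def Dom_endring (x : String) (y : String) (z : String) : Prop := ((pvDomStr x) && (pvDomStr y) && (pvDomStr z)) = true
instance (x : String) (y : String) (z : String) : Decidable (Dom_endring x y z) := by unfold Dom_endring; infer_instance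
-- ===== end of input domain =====

-- B replaces A's overwrite-pairs-by-index list mutation with two staged passes:
-- a set of match-start indices, then a pointer-jumping emission loop (objective: alternative).

-- ===== PORT A =====
def endring (x : String) (y : String) (z : String) : String :=
  let liste_x : List String := x.toList.map (fun c => String.ofList [c])
  let liste_y : List String := y.toList.map (fun c => String.ofList [c])
  let liste_t : List String := y.toList.map (fun c => String.ofList [c])
  let t := (PySem.List.pyRange 0 (PySem.Str.len y - 1) 1).foldl (fun t i =>
    match PySem.List.pyGet? liste_y i, PySem.List.pyGet? liste_x 0 with
    | some yi, some x0 =>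
      if PySem.Str.lower yi == PySem.Str.lower x0 then
        match PySem.List.pyGet? liste_y (i + 1), PySem.List.pyGet? liste_x 1 with
        | some yi1, some x1 =>
          if PySem.Str.lower yi1 == PySem.Str.lower x1 then
            (t.set i.toNat z).set (i.toNat + 1) ""
          else t
        | _, _ => t
      else t
    | _, _ => t
    ) liste_t
  PySem.Str.join "" t

-- ===== PORT B =====
-- the set comprehension of match-start indices (Source B's 'starts')
def pvStartsSet (x : String) (y : String) : PySem.Set Int :=
  PySem.Set.ofList ((PySem.List.pyRange 0 (PySem.Str.len y - 1) 1).filter (fun i =>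
    match PySem.Str.pyGet? y i with
    | none => false
    | some yi =>
      match PySem.Str.pyGet? x 0 with
      | none => false
      | some x0 =>
        if PySem.Chars.lowerChar yi == PySem.Chars.lowerChar x0 then
          match PySem.Str.pyGet? y (i + 1) with
          | none => false
          | some yi1 =>
            match PySem.Str.pyGet? x 1 with
            | none => false
            | some x1 => PySem.Chars.lowerChar yi1 == PySem.Chars.lowerChar x1
        else false))

-- Source B's pointer-jumping while loop
def pvLoopB (starts : PySem.Set Int) (y : String) (z : String) (n : Nat) (i : Nat)
    (parts : List String) : List String :=
  if h : i < n then
    if PySem.Set.contains starts (i : Int) then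
      if PySem.Set.contains starts ((i : Int) + 1) then
        pvLoopB starts y z n (i + 1) (parts ++ [z])
      else
        pvLoopB starts y z n (i + 2) (parts ++ [z])
    else
      pvLoopB starts y z n (i + 1)
        (parts ++ [match PySem.Str.pyGet? y (i : Int) with
                   | some c => String.ofList [c]
                   | none => ""])
  else parts
termination_by n - i
decreasing_by all_goals omega

def endring_alt (x : String) (y : String) (z : String) : String :=
  let n := PySem.Str.len y
  let starts := pvStartsSet x y
  PySem.Str.join "" (pvLoopB starts y z n.toNat 0 [])

-- ===== PRECONDITION & SPEC =====
-- Pre_ excludes exactly the inputs where BOTH Pythons raise IndexError: x = "" with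
-- len(y) ≥ 2, and len(x) = 1 when some non-final character of y matches x[0]
-- case-insensitively (then x[1] is read).  A returns on every admitted input.
def Pre_endring (x : String) (y : String) (z : String) : Prop :=
  (x.toList = [] → y.toList.length ≤ 1) ∧
  (x.toList.length = 1 →
    ∀ d ∈ y.toList.dropLast, PySem.Chars.lowerChar d ≠ PySem.Chars.lowerChar (x.toList.getD 0 ' '))
instance (x : String) (y : String) (z : String) : Decidable (Pre_endring x y z) := by
  unfold Pre_endring; infer_instance
def pvWitness_endring : String × String × String := ("ab", "xAbab!", "Z")
def Spec_endring (x : String) (y : String) (z : String) (out : String) : Prop := out = endring_alt x y z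
instance (x : String) (y : String) (z : String) (out : String) : Decidable (Spec_endring x y z out) := by unfold Spec_endring; infer_instance

-- ===== CLAIM (what is proved, stated in full; the proofs are below) =====
def Claim_equal_endring : Prop := ∀ (x : String) (y : String) (z : String), Dom_endring x y z → Pre_endring x y z → Spec_endring x y z (endring x y z)

-- ===== LEMMAS AND PROOFS =====

def pvM (xs cs : List Char) (i : Nat) : Bool :=
  match cs[i]?, cs[i+1]?, xs[0]?, xs[1]? with
  | some a, some b, some c0, some c1 =>
      (PySem.Chars.lowerChar a == PySem.Chars.lowerChar c0) &&
      (PySem.Chars.lowerChar b == PySem.Chars.lowerChar c1)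
  | _, _, _, _ => false

def pvF (xs cs : List Char) (z : String) (j : Nat) : String :=
  if pvM xs cs j then z
  else if 1 ≤ j ∧ pvM xs cs (j-1) = true then ""
  else String.ofList [cs.getD j ' ']

def pvG (xs cs : List Char) (z : String) (k j : Nat) : String :=
  if j < k ∧ pvM xs cs j = true then z
  else if 1 ≤ j ∧ j - 1 < k ∧ pvM xs cs (j-1) = true then ""
  else String.ofList [cs.getD j ' ']

-- lower on single-char strings
lemma pv_lower_single (c : Char) :
    PySem.Str.lower (String.ofList [c]) = String.ofList [PySem.Chars.lowerChar c] := by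
  apply String.toList_inj.mp
  rw [PySem.Str.toList_lower]
  simp [PySem.Chars.lower]

lemma pv_lower_beq (a b : Char) :
    ((PySem.Str.lower (String.ofList [a])) == (PySem.Str.lower (String.ofList [b])))
      = (PySem.Chars.lowerChar a == PySem.Chars.lowerChar b) := by
  rw [pv_lower_single, pv_lower_single]
  rcases Decidable.em (PySem.Chars.lowerChar a = PySem.Chars.lowerChar b) with he | he
  · simp [he]
  · simp [he]
    exact fun hc => he (by have := congrArg String.toList hc; simpa using this)

lemma pv_set_map_range {α} (n i : Nat) (g : Nat → α) (v : α) :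
    ((List.range n).map g).set i v = (List.range n).map (fun j => if j = i then v else g j) := by
  apply List.ext_getElem
  · simp
  · intro j h1 h2
    simp only [List.getElem_set, List.getElem_map, List.getElem_range]
    rcases eq_or_ne i j with h | h
    · simp [h]
    · simp [h, Ne.symm h]

lemma pv_map_eq_range_map {α} (cs : List Char) (f : Char → α) :
    cs.map f = (List.range cs.length).map (fun j => f (cs.getD j ' ')) := by
  apply List.ext_getElem
  · simp
  · intro j h1 h2
    have hj : j < cs.length := by simpa using h1
    simp [List.getD_eq_getElem?_getD, List.getElem?_eq_getElem hj]

lemma pv_fold_inv {α} (step : List α → Nat → List α) (g : Nat → Nat → α) (n : Nat) :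
    ∀ K, (∀ k < K, step ((List.range n).map (g k)) k = (List.range n).map (g (k+1))) →
      (List.range K).foldl step ((List.range n).map (g 0)) = (List.range n).map (g K) := by
  intro K
  induction K with
  | zero => intro _; simp
  | succ K ih =>
    intro h
    rw [List.range_succ, List.foldl_append, ih (fun k hk => h k (by omega))]
    simpa using h K (by omega)


lemma pvM_of_lt (xs cs : List Char) (c0 c1 : Char) (rest : List Char) (k : Nat)
    (hx : xs = c0 :: c1 :: rest) (hk : k + 1 < cs.length) :
    pvM xs cs k = ((PySem.Chars.lowerChar (cs.getD k ' ') == PySem.Chars.lowerChar c0) &&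
                   (PySem.Chars.lowerChar (cs.getD (k+1) ' ') == PySem.Chars.lowerChar c1)) := by
  subst hx
  unfold pvM
  rw [List.getElem?_eq_getElem (by omega : k < cs.length), List.getElem?_eq_getElem hk]
  simp [List.getD_eq_getElem?_getD, hk, (by omega : k < cs.length)]

lemma pvM_false_of_short (xs cs : List Char) (k : Nat) (hx : xs[1]? = none ∨ ¬ k + 1 < cs.length) :
    pvM xs cs k = false := by
  unfold pvM
  rcases hx with hx | hx
  · rcases h0 : cs[k]? with _ | a <;> rcases h1 : cs[k+1]? with _ | b <;>
      rcases h2 : xs[0]? with _ | c0 <;> simp_all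
  · rw [List.getElem?_eq_none (by omega : cs.length ≤ k + 1)]
    rcases h0 : cs[k]? with _ | a <;> simp

lemma pvM_lt (xs cs : List Char) (k : Nat) (h : pvM xs cs k = true) : k + 1 < cs.length := by
  by_contra hc
  rw [pvM_false_of_short xs cs k (Or.inr hc)] at h
  exact absurd h (by simp)

lemma pvG_succ_true (xs cs : List Char) (z : String) (k j : Nat) (hm : pvM xs cs k = true) :
    pvG xs cs z (k+1) j = if j = k then z else if j = k + 1 then "" else pvG xs cs z k j := by
  rcases eq_or_ne j k with rfl | hjk
  · simp [pvG, hm]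
  · rcases eq_or_ne j (k+1) with rfl | hjk1
    · simp [pvG, hm]
    · have h1 : (j < k + 1 ∧ pvM xs cs j = true) ↔ (j < k ∧ pvM xs cs j = true) := by
        constructor <;> rintro ⟨a, b⟩ <;> exact ⟨by omega, b⟩
      have h2 : (1 ≤ j ∧ j - 1 < k + 1 ∧ pvM xs cs (j-1) = true) ↔
                (1 ≤ j ∧ j - 1 < k ∧ pvM xs cs (j-1) = true) := by
        constructor <;> rintro ⟨a, b, c⟩ <;> exact ⟨a, by omega, c⟩
      simp only [pvG, hjk, hjk1]
      rw [if_congr h1 rfl rfl, if_congr h2 rfl rfl]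
      simp

lemma pvG_succ_false (xs cs : List Char) (z : String) (k j : Nat) (hm : pvM xs cs k = false) :
    pvG xs cs z (k+1) j = pvG xs cs z k j := by
  have h1 : (j < k + 1 ∧ pvM xs cs j = true) ↔ (j < k ∧ pvM xs cs j = true) := by
    constructor <;> rintro ⟨a, b⟩
    · refine ⟨?_, b⟩
      rcases eq_or_ne j k with rfl | hjk
      · rw [hm] at b; cases b
      · omega
    · exact ⟨by omega, b⟩
  have h2 : (1 ≤ j ∧ j - 1 < k + 1 ∧ pvM xs cs (j-1) = true) ↔
            (1 ≤ j ∧ j - 1 < k ∧ pvM xs cs (j-1) = true) := by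
    constructor <;> rintro ⟨a, b, c⟩
    · refine ⟨a, ?_, c⟩
      rcases eq_or_ne (j-1) k with he | hjk
      · rw [he, hm] at c; cases c
      · omega
    · exact ⟨a, by omega, c⟩
  simp only [pvG]
  rw [if_congr h1 rfl rfl, if_congr h2 rfl rfl]

lemma pvG_final (xs cs : List Char) (z : String) (j : Nat) (_hj : j < cs.length) :
    pvG xs cs z (cs.length - 1) j = pvF xs cs z j := by
  have h1 : (j < cs.length - 1 ∧ pvM xs cs j = true) ↔ (pvM xs cs j = true) := by
    constructor
    · rintro ⟨_, b⟩; exact b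
    · intro b; exact ⟨by have := pvM_lt xs cs j b; omega, b⟩
  have h2 : (1 ≤ j ∧ j - 1 < cs.length - 1 ∧ pvM xs cs (j-1) = true) ↔
            (1 ≤ j ∧ pvM xs cs (j-1) = true) := by
    constructor
    · rintro ⟨a, _, c⟩; exact ⟨a, c⟩
    · rintro ⟨a, c⟩; exact ⟨a, by have := pvM_lt xs cs (j-1) c; omega, c⟩
  simp only [pvG, pvF]
  rw [if_congr h1 rfl rfl, if_congr h2 rfl rfl]

lemma pv_fold_inv' {α} (step : List α → Nat → List α) (g : Nat → Nat → α) (n K : Nat)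
    (init : List α) (hinit : init = (List.range n).map (g 0))
    (h : ∀ k < K, step ((List.range n).map (g k)) k = (List.range n).map (g (k+1))) :
    List.foldl step init (List.range K) = (List.range n).map (g K) := by
  subst hinit
  exact pv_fold_inv step g n K h

lemma pv_pyGet?_zero {α : Type} (a : α) (l : List α) : PySem.List.pyGet? (a :: l) 0 = some a := by
  simpa using PySem.List.pyGet?_natCast (a :: l) 0

lemma pv_pyGet?_one {α : Type} (a b : α) (l : List α) : PySem.List.pyGet? (a :: b :: l) 1 = some b := by
  simpa using PySem.List.pyGet?_natCast (a :: b :: l) 1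

lemma pv_pyGet?_map_single (cs : List Char) (k : Nat) (hk : k < cs.length) :
    PySem.List.pyGet? (cs.map (fun c => String.ofList [c])) (k : Int)
      = some (String.ofList [cs.getD k ' ']) := by
  rw [PySem.List.pyGet?_natCast]
  simp [List.getElem?_eq_getElem hk, List.getD_eq_getElem?_getD]

lemma pvA_eq (x y z : String) :
    endring x y z = PySem.Str.join "" ((List.range y.toList.length).map (pvF x.toList y.toList z)) := by
  unfold endring
  simp only [PySem.Str.len_eq, PySem.List.pyRange_one, List.foldl_map]
  rw [show ((y.toList.length : Int) - 1 - 0).toNat = y.toList.length - 1 from by omega]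
  rw [pv_fold_inv' _ (pvG x.toList y.toList z) y.toList.length (y.toList.length - 1) _
    (by rw [pv_map_eq_range_map y.toList (fun c => String.ofList [c])]
        exact List.map_congr_left (fun j hj => by simp [pvG]))
    ?hstep]
  · exact congrArg _ (List.map_congr_left (fun j hj => pvG_final x.toList y.toList z j (by simpa using hj)))
  case hstep =>
    intro k hk
    have hk1 : k + 1 < y.toList.length := by omega
    simp only [zero_add, Int.toNat_natCast]
    rw [pv_pyGet?_map_single y.toList k (by omega)]
    rw [show ((k : Int) + 1) = ((k + 1 : Nat) : Int) from by push_cast; ring]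
    rw [pv_pyGet?_map_single y.toList (k+1) hk1]
    rcases hx : x.toList with _ | ⟨c0, xs1⟩
    · rw [show PySem.List.pyGet? (List.map (fun c => String.ofList [c]) ([] : List Char)) 0 = none from by simpa using PySem.List.pyGet?_natCast (List.map (fun c => String.ofList [c]) ([] : List Char)) 0]
      exact (List.map_congr_left (fun j hj => (pvG_succ_false [] y.toList z k j
        (pvM_false_of_short _ _ _ (Or.inl rfl))).symm))
    · rcases xs1 with _ | ⟨c1, xs2⟩
      · simp only [List.map_cons, List.map_nil, pv_pyGet?_zero]
        rw [show PySem.List.pyGet? [String.ofList [c0]] 1 = none from by simpa using PySem.List.pyGet?_natCast [String.ofList [c0]] 1]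
        have hm : pvM [c0] y.toList k = false :=
          pvM_false_of_short _ _ _ (Or.inl rfl)
        have hG := fun j => (pvG_succ_false [c0] y.toList z k j hm).symm
        cases (PySem.Str.lower (String.ofList [y.toList.getD k ' ']) == PySem.Str.lower (String.ofList [c0])) <;>
          exact List.map_congr_left (fun j _ => hG j)
      · simp only [List.map_cons, pv_pyGet?_zero, pv_pyGet?_one]
        rw [pv_lower_beq, pv_lower_beq]
        have hmeq := pvM_of_lt (c0 :: c1 :: xs2) y.toList c0 c1 xs2 k rfl hk1
        cases hb1 : (PySem.Chars.lowerChar (y.toList.getD k ' ') == PySem.Chars.lowerChar c0) <;>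
          cases hb2 : (PySem.Chars.lowerChar (y.toList.getD (k+1) ' ') == PySem.Chars.lowerChar c1)
        all_goals simp only [hb1, hb2] at hmeq ⊢
        · exact List.map_congr_left (fun j hj => (pvG_succ_false (c0 :: c1 :: xs2) y.toList z k j (by simpa using hmeq)).symm)
        · exact List.map_congr_left (fun j hj => (pvG_succ_false (c0 :: c1 :: xs2) y.toList z k j (by simpa using hmeq)).symm)
        · simp only [Bool.true_and] at hmeq
          exact List.map_congr_left (fun j hj => (pvG_succ_false (c0 :: c1 :: xs2) y.toList z k j (by simpa using hmeq)).symm)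
        · have hm : pvM (c0 :: c1 :: xs2) y.toList k = true := by simpa using hmeq
          rw [pv_set_map_range, pv_set_map_range]
          refine List.map_congr_left (fun j hj => ?_)
          rw [pvG_succ_true (c0 :: c1 :: xs2) y.toList z k j hm]
          rcases eq_or_ne j k with rfl | h1
          · simp
          · rcases eq_or_ne j (k+1) with rfl | h2
            · simp
            · simp [h1, h2]

-- ===== B side =====

lemma pv_getD_eq (cs : List Char) (k : Nat) (hk : k < cs.length) : cs.getD k ' ' = cs[k] := by
  simp [List.getD_eq_getElem?_getD, List.getElem?_eq_getElem hk]


-- the filter predicate of pvStartsSet, evaluated at an in-range index, is pvM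
lemma pv_pred_eq (x y : String) (k : Nat) (hk : k + 1 < y.toList.length) :
    (match PySem.Str.pyGet? y (k : Int) with
     | none => false
     | some yi =>
       match PySem.Str.pyGet? x 0 with
       | none => false
       | some x0 =>
         if PySem.Chars.lowerChar yi == PySem.Chars.lowerChar x0 then
           match PySem.Str.pyGet? y ((k : Int) + 1) with
           | none => false
           | some yi1 =>
             match PySem.Str.pyGet? x 1 with
             | none => false
             | some x1 => PySem.Chars.lowerChar yi1 == PySem.Chars.lowerChar x1
         else false) = pvM x.toList y.toList k := by
  have hk0 : k < y.toList.length := by omega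
  rw [show PySem.Str.pyGet? y (k : Int) = some (y.toList[k]'hk0) from by
        rw [PySem.Str.pyGet?_natCast, List.getElem?_eq_getElem hk0]]
  rw [show ((k : Int) + 1) = ((k + 1 : Nat) : Int) from by push_cast; ring]
  rw [show PySem.Str.pyGet? y ((k + 1 : Nat) : Int) = some (y.toList[k+1]'hk) from by
        rw [PySem.Str.pyGet?_natCast, List.getElem?_eq_getElem hk]]
  rw [show PySem.Str.pyGet? x 0 = x.toList[0]? from by simpa using PySem.Str.pyGet?_natCast x 0]
  rw [show PySem.Str.pyGet? x 1 = x.toList[1]? from by simpa using PySem.Str.pyGet?_natCast x 1]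
  unfold pvM
  rw [List.getElem?_eq_getElem hk0, List.getElem?_eq_getElem hk]
  rcases h0 : x.toList[0]? with _ | c0 <;> rcases h1 : x.toList[1]? with _ | c1
  · rfl
  · rfl
  · cases hcmp : (PySem.Chars.lowerChar (y.toList[k]'hk0) == PySem.Chars.lowerChar c0) <;> simp [hcmp]
  · cases hcmp : (PySem.Chars.lowerChar (y.toList[k]'hk0) == PySem.Chars.lowerChar c0) <;> simp [hcmp]

-- membership in Source B's 'starts' set coincides with the match predicate pvM
lemma pv_mem_starts (x y : String) (k : Nat) :
    PySem.Set.contains (pvStartsSet x y) (k : Int) = pvM x.toList y.toList k := by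
  have hmem : (k : Int) ∈ pvStartsSet x y ↔ pvM x.toList y.toList k = true := by
    unfold pvStartsSet
    rw [PySem.Set.mem_ofList, List.mem_filter]
    simp only [PySem.Str.len_eq, PySem.List.pyRange_one, List.mem_map, List.mem_range]
    constructor
    · rintro ⟨⟨j, hj, hjk⟩, hp⟩
      have hk1 : k + 1 < y.toList.length := by omega
      rw [pv_pred_eq x y k hk1] at hp
      exact hp
    · intro hm
      have hk1 : k + 1 < y.toList.length := pvM_lt _ _ _ hm
      exact ⟨⟨k, by omega, by push_cast; ring⟩, by rw [pv_pred_eq x y k hk1]; exact hm⟩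
  rcases hb : pvM x.toList y.toList k with _ | _
  · rw [hb] at hmem
    rcases hc : PySem.Set.contains (pvStartsSet x y) (k : Int) with _ | _
    · rfl
    · exact absurd (hmem.mp ((PySem.Set.contains_iff _ _).mp hc)) (by simp)
  · exact (PySem.Set.contains_iff _ _).mpr (hmem.mpr hb)

-- character concatenation of a list of strings
def pvConcat (l : List String) : List Char := (l.map String.toList).flatten

lemma pv_join_nil_sep (ls : List (List Char)) : PySem.Chars.join [] ls = ls.flatten := by
  induction ls with
  | nil => simp [PySem.Chars.join, List.intercalate]
  | cons a t ih =>
    cases t with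
    | nil => simp [PySem.Chars.join, List.intercalate]
    | cons b t' =>
      rw [PySem.Chars.join_cons_cons, ih]
      simp

lemma pv_join_empty_sep (l : List String) :
    (PySem.Str.join "" l).toList = pvConcat l := by
  rw [PySem.Str.toList_join]
  have : ("" : String).toList = [] := rfl
  rw [this, pv_join_nil_sep]
  rfl

lemma pv_concat_snoc (parts : List String) (s : String) :
    pvConcat (parts ++ [s]) = pvConcat parts ++ s.toList := by
  simp [pvConcat]

lemma pvLoop_concat (x y z : String) (fuel : Nat) :
    ∀ i parts, y.toList.length - i ≤ fuel →
      (i = 0 ∨ pvM x.toList y.toList (i-1) = false ∨ pvM x.toList y.toList i = true) →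
      pvConcat (pvLoopB (pvStartsSet x y) y z y.toList.length i parts)
        = pvConcat parts ++ pvConcat ((List.range' i (y.toList.length - i)).map (pvF x.toList y.toList z)) := by
  induction fuel with
  | zero =>
    intro i parts hf _
    have hn : ¬ i < y.toList.length := by omega
    rw [pvLoopB, dif_neg hn]
    rw [show y.toList.length - i = 0 from by omega]
    simp [pvConcat]
  | succ fuel ih =>
    intro i parts hf hinv
    by_cases hn : i < y.toList.length
    · rw [pvLoopB, dif_pos hn]
      rw [pv_mem_starts x y i]
      rw [show ((i : Int) + 1) = ((i + 1 : Nat) : Int) from by push_cast; ring,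
          pv_mem_starts x y (i+1)]
      rcases hm : pvM x.toList y.toList i with _ | _
      · -- no match at i: emit y[i], advance by 1
        simp only [Bool.false_eq_true, if_false]
        rw [show PySem.Str.pyGet? y (i : Int) = some (y.toList[i]'hn) from by
              rw [PySem.Str.pyGet?_natCast, List.getElem?_eq_getElem hn]]
        rw [ih (i+1) _ (by omega) (Or.inr (Or.inl (by simpa using hm)))]
        rw [pv_concat_snoc]
        have hF : pvF x.toList y.toList z i = String.ofList [y.toList[i]'hn] := by
          unfold pvF
          rw [if_neg (by simp [hm]), if_neg ?_, pv_getD_eq _ _ hn]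
          rintro ⟨h1, h2⟩
          rcases hinv with h | h | h
          · omega
          · rw [h] at h2; exact Bool.false_ne_true h2
          · rw [hm] at h; exact Bool.false_ne_true h
        rw [show y.toList.length - i = (y.toList.length - (i+1)) + 1 from by omega,
            List.range'_succ, List.map_cons]
        rw [hF]
        simp [pvConcat]
      · have hlt : i + 1 < y.toList.length := pvM_lt _ _ _ hm
        have hFz : pvF x.toList y.toList z i = z := by
          unfold pvF; rw [if_pos (by simp [hm])]
        rcases hm1 : pvM x.toList y.toList (i+1) with _ | _
        · -- match at i, none at i+1: emit z, skip i+1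
          simp only [if_true, Bool.false_eq_true, if_false]
          rw [ih (i+2) _ (by omega) (Or.inr (Or.inl (by simpa using hm1)))]
          rw [pv_concat_snoc]
          have hF1 : pvF x.toList y.toList z (i+1) = "" := by
            unfold pvF
            rw [if_neg (by simp [hm1]), if_pos ⟨by omega, by simpa using hm⟩]
          rw [show y.toList.length - i = (y.toList.length - (i+2)) + 1 + 1 from by omega,
              List.range'_succ, List.map_cons, List.range'_succ, List.map_cons]
          rw [hFz, hF1]
          simp [pvConcat]
        · -- overlapping match: emit z, advance by 1
          simp only [if_true]
          rw [ih (i+1) _ (by omega) (Or.inr (Or.inr (by simpa using hm1)))]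
          rw [pv_concat_snoc]
          rw [show y.toList.length - i = (y.toList.length - (i+1)) + 1 from by omega,
              List.range'_succ, List.map_cons]
          rw [hFz]
          simp [pvConcat]
    · rw [pvLoopB, dif_neg hn]
      rw [show y.toList.length - i = 0 from by omega]
      simp [pvConcat]

lemma pvB_eq (x y z : String) :
    endring_alt x y z = PySem.Str.join "" ((List.range y.toList.length).map (pvF x.toList y.toList z)) := by
  unfold endring_alt
  apply String.toList_inj.mp
  rw [pv_join_empty_sep, pv_join_empty_sep]
  simp only [PySem.Str.len_eq, Int.toNat_natCast]
  rw [pvLoop_concat x y z y.toList.length 0 [] (by omega) (Or.inl rfl)]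
  rw [List.range_eq_range']
  simp [pvConcat]

-- ===== VERDICT (by name: the statement is the Claim_ definition above) =====
theorem endring_spec : Claim_equal_endring := by
  intro x y z _ _
  unfold Spec_endring
  rw [pvA_eq, pvB_eq]
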